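-- pv_equiv track=rewrite | github.com/KyouGit/ai_research_portfolio | main.py | infer_category_from_checklist
-- ===== SOURCE A (Python) =====
-- def infer_category_from_checklist(checklist_text: str, paper_title: str) -> str:
--     current = "General"
--     for raw in checklist_text.splitlines():
--         line = raw.strip()
--         if line.startswith("## "):
--             current = line.replace("## ", "", 1).strip() or "General"
--             continue
--         if line in {f"- [ ] {paper_title}", f"- [x] {paper_title}"}:
--             return current
--     return "General"
-- ===== SOURCE B (Python) =====
-- def infer_category_from_checklist(checklist_text: str, paper_title: str) -> str:
--     # Parse once into a title -> category table (first occurrence wins), then look up.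
--     index = {}
--     current = "General"
--     for raw in checklist_text.splitlines():
--         line = raw.strip()
--         if line.startswith("## "):
--             current = line[3:].strip() or "General"
--         elif line.startswith("- [ ] ") or line.startswith("- [x] "):
--             title = line[6:]
--             if title not in index:
--                 index[title] = current
--     return index.get(paper_title, "General")
-- ===== Notes on version B (the rewrite author's own statement) =====
-- stated objective: alternative
-- what changed: Replaces A's early-returning scan with a one-pass parse of the checklist into a title->category dict (first occurrence kept) followed by a single lookup with a 'General' default.
import Mathlib
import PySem

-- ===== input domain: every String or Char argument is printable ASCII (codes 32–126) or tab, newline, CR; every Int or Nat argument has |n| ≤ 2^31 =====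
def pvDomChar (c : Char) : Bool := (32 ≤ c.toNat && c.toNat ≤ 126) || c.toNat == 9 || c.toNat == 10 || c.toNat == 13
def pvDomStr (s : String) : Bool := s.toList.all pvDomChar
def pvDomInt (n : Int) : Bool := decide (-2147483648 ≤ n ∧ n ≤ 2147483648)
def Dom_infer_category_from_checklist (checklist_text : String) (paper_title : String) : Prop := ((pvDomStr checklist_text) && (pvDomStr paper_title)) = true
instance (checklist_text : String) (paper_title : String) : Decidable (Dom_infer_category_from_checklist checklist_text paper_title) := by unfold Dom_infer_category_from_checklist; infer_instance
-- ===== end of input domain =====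

-- B parses the checklist once into a title→category table and does one lookup, instead of A's early-returning scan; objective: alternative decomposition, same cost.


-- ===== PORT A =====
-- hand port of s.replace(old, new, 1): replace the leftmost occurrence of old (exact for the use here)
def pvReplace1 (old new : List Char) : List Char → List Char
  | [] => if old.isPrefixOf ([] : List Char) then new else []
  | c :: cs => if old.isPrefixOf (c :: cs) then new ++ (c :: cs).drop old.length
               else c :: pvReplace1 old new cs

def icfcA_loop (title : List Char) : List (List Char) → List Char → List Char
  | [], _ => "General".toList
  | raw :: rest, cur =>
    let line := PySem.Chars.strip raw
    if PySem.Chars.startswith line "## ".toList then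
      let nc := PySem.Chars.strip (pvReplace1 "## ".toList [] line)
      icfcA_loop title rest (if nc = [] then "General".toList else nc)
    else if line = "- [ ] ".toList ++ title ∨ line = "- [x] ".toList ++ title then cur
    else icfcA_loop title rest cur

def infer_category_from_checklist (checklist_text : String) (paper_title : String) : String :=
  String.ofList (icfcA_loop paper_title.toList (PySem.Chars.splitlines checklist_text.toList) "General".toList)

-- ===== PORT B =====
def icfcB_loop : List (List Char) → List Char → PySem.Dict (List Char) (List Char) → PySem.Dict (List Char) (List Char)
  | [], _, d => d
  | raw :: rest, cur, d =>
    let line := PySem.Chars.strip raw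
    if PySem.Chars.startswith line "## ".toList then
      let nc := PySem.Chars.strip (line.drop 3)
      icfcB_loop rest (if nc = [] then "General".toList else nc) d
    else if PySem.Chars.startswith line "- [ ] ".toList || PySem.Chars.startswith line "- [x] ".toList then
      let ttl := line.drop 6
      icfcB_loop rest cur (if d.contains ttl then d else d.insert ttl cur)
    else icfcB_loop rest cur d

def infer_category_from_checklist_alt (checklist_text : String) (paper_title : String) : String :=
  String.ofList ((icfcB_loop (PySem.Chars.splitlines checklist_text.toList) "General".toList PySem.Dict.empty).getD paper_title.toList "General".toList)

-- ===== PRECONDITION & SPEC =====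
def Spec_infer_category_from_checklist (checklist_text : String) (paper_title : String) (out : String) : Prop := out = infer_category_from_checklist_alt checklist_text paper_title
instance (checklist_text : String) (paper_title : String) (out : String) : Decidable (Spec_infer_category_from_checklist checklist_text paper_title out) := by unfold Spec_infer_category_from_checklist; infer_instance

-- ===== CLAIM (what is proved, stated in full; the proofs are below) =====
def Claim_equal_infer_category_from_checklist : Prop := ∀ (checklist_text : String) (paper_title : String), Dom_infer_category_from_checklist checklist_text paper_title → Spec_infer_category_from_checklist checklist_text paper_title (infer_category_from_checklist checklist_text paper_title)

-- ===== LEMMAS AND PROOFS =====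

-- replacing the first occurrence of a prefix removes it
theorem pvReplace1_of_prefix (old : List Char) (s : List Char) (h : old.isPrefixOf s) :
    pvReplace1 old [] s = s.drop old.length := by
  cases s with
  | nil => simp [pvReplace1, h]
  | cons c cs => simp [pvReplace1, h]

-- once the looked-up key is present, the rest of the build never changes its binding
theorem icfcB_frozen (p : List Char) (lines : List (List Char)) (cur : List Char)
    (d : PySem.Dict (List Char) (List Char)) (h : d.contains p = true) :
    (icfcB_loop lines cur d).getD p "General".toList = d.getD p "General".toList := by
  induction lines generalizing cur d with
  | nil => rfl
  | cons raw rest ih =>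
    simp only [icfcB_loop]
    split
    · exact ih _ _ h
    · split
      · by_cases hc : PySem.Dict.contains d ((PySem.Chars.strip raw).drop 6) = true
        · simp only [hc, if_true]; exact ih _ _ h
        · have hne : p ≠ (PySem.Chars.strip raw).drop 6 := by
            intro he; rw [he] at h; exact absurd h (by simp [hc])
          rw [if_neg hc]
          rw [ih _ _ (by simp [PySem.Dict.contains_insert, h])]
          exact PySem.Dict.getD_insert_of_ne _ _ _ hne
      · exact ih _ _ h

-- while the looked-up key is absent, B's final lookup equals A's early-returning scan
theorem icfcB_key (p : List Char) (lines : List (List Char)) (cur : List Char)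
    (d : PySem.Dict (List Char) (List Char)) (h : d.contains p = false) :
    (icfcB_loop lines cur d).getD p "General".toList = icfcA_loop p lines cur := by
  induction lines generalizing cur d with
  | nil =>
    simp only [icfcB_loop, icfcA_loop]
    exact PySem.Dict.getD_of_not_contains _ _ h
  | cons raw rest ih =>
    simp only [icfcB_loop, icfcA_loop]
    by_cases hh : PySem.Chars.startswith (PySem.Chars.strip raw) "## ".toList = true
    · -- header line: same new current on both sides
      have hpre : ("## ".toList).isPrefixOf (PySem.Chars.strip raw) := by
        have := (PySem.Chars.startswith_iff _ _).1 hh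
        exact List.isPrefixOf_iff_prefix.2 this
      rw [if_pos hh, if_pos hh, pvReplace1_of_prefix _ _ hpre]
      exact ih _ _ h
    · rw [if_neg hh, if_neg hh]
      by_cases hm : PySem.Chars.strip raw = "- [ ] ".toList ++ p ∨ PySem.Chars.strip raw = "- [x] ".toList ++ p
      · -- matching checklist line: B records (p, cur), frozen thereafter
        rw [if_pos hm]
        have hsw : (PySem.Chars.startswith (PySem.Chars.strip raw) "- [ ] ".toList
            || PySem.Chars.startswith (PySem.Chars.strip raw) "- [x] ".toList) = true := by
          rcases hm with hm | hm <;>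
            simp [hm, PySem.Chars.startswith_iff]
        rw [if_pos hsw]
        have hd6 : (PySem.Chars.strip raw).drop 6 = p := by
          rcases hm with hm | hm <;> simp [hm]
        rw [hd6, if_neg (by simp [h])]
        rw [icfcB_frozen p rest cur _ (by simp)]
        exact PySem.Dict.getD_insert_self _ _ _ _
      · rw [if_neg hm]
        by_cases hsw : (PySem.Chars.startswith (PySem.Chars.strip raw) "- [ ] ".toList
            || PySem.Chars.startswith (PySem.Chars.strip raw) "- [x] ".toList) = true
        · -- other checklist line: its title differs from p, so p stays absent
          rw [if_pos hsw]
          have hne : (PySem.Chars.strip raw).drop 6 ≠ p := by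
            intro he
            apply hm
            rcases Bool.or_eq_true_iff.1 hsw with hs | hs
            · left
              obtain ⟨t, ht⟩ := (PySem.Chars.startswith_iff _ _).1 hs
              rw [← ht] at he ⊢
              have : t = p := by simpa using he
              rw [this]
            · right
              obtain ⟨t, ht⟩ := (PySem.Chars.startswith_iff _ _).1 hs
              rw [← ht] at he ⊢
              have : t = p := by simpa using he
              rw [this]
          by_cases hc : PySem.Dict.contains d ((PySem.Chars.strip raw).drop 6) = true
          · simp only [hc, if_true]; exact ih _ _ h
          · rw [if_neg (by simp [hc])]
            exact ih _ _ (by simp [PySem.Dict.contains_insert, h, Ne.symm hne])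
        · rw [if_neg hsw]; exact ih _ _ h

-- ===== VERDICT (by name: the statement is the Claim_ definition above) =====
theorem infer_category_from_checklist_spec : Claim_equal_infer_category_from_checklist := by
  intro t p _
  unfold Spec_infer_category_from_checklist infer_category_from_checklist infer_category_from_checklist_alt
  rw [icfcB_key p.toList _ _ _ (by simp)]
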